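-- pv_equiv track=rewrite | github.com/gciatto/unibo-courses-cs-restructuring | download_courses.py | extract_details_from_parentheses
-- ===== SOURCE A (Python) =====
-- def extract_details_from_parentheses(text: str) -> tuple[str, list[str]]:
--     details: list[str] = []
--     cleaned_chars: list[str] = []
--     current_detail: list[str] = []
--     depth = 0
--
--     for char in text:
--         if char == "(":
--             if depth == 0:
--                 current_detail = []
--             else:
--                 current_detail.append(char)
--             depth += 1
--             continue
--
--         if char == ")":
--             if depth == 0:
--                 cleaned_chars.append(char)
--                 continue
--
--             depth -= 1
--             if depth == 0:
--                 content = "".join(current_detail).strip()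
--                 if content and not content.startswith("-"):
--                     details.append(content)
--                 current_detail = []
--             else:
--                 current_detail.append(char)
--             continue
--
--         if depth == 0:
--             cleaned_chars.append(char)
--         else:
--             current_detail.append(char)
--
--     if depth > 0:
--         cleaned_chars.append("(" + "".join(current_detail))
--
--     return "".join(cleaned_chars).strip(), details
-- ===== SOURCE B (Python) =====
-- def extract_details_from_parentheses(text: str) -> tuple[str, list[str]]:
--     details: list[str] = []
--     outer: list[str] = []
--     stack: list[list[str]] = []
--
--     for ch in text:
--         if ch == "(":
--             stack.append([])
--         elif ch == ")":
--             if not stack: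
--                 outer.append(ch)
--             else:
--                 inner = "".join(stack.pop())
--                 if stack:
--                     stack[-1].append("(" + inner + ")")
--                 else:
--                     content = inner.strip()
--                     if content and not content.startswith("-"):
--                         details.append(content)
--         elif stack:
--             stack[-1].append(ch)
--         else:
--             outer.append(ch)
--
--     tail = ""
--     while stack:
--         tail = "(" + "".join(stack.pop()) + tail
--     outer.append(tail)
--
--     return "".join(outer).strip(), details
-- ===== Notes on version B (the rewrite author's own statement) =====
-- stated objective: alternative
-- what changed: B replaces A's depth-counter state machine (one current-detail buffer plus an integer depth, nested groups re-appended char by char) with an explicit stack of buffers: an opening paren pushes a fresh frame, a closing paren pops one and either re-wraps the finished nested group into its parent frame or emits a top-level detail, and unclosed frames are rebuilt back-to-front at the end.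
import Mathlib
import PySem

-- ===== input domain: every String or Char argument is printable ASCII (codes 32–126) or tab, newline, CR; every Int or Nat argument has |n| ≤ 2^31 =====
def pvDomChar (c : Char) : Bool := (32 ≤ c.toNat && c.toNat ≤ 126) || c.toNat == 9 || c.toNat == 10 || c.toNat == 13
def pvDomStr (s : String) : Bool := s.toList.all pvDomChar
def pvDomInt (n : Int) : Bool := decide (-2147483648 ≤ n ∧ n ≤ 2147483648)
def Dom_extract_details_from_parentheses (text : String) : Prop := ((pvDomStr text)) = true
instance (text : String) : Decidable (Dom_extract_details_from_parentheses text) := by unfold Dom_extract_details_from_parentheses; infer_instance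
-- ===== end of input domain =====

-- B replaces A's depth-counter state machine with an explicit stack of buffers
-- ('(' pushes a frame, ')' pops and re-wraps or emits a detail; unclosed frames
-- are rebuilt back-to-front at the end); same cost, different data structure.

-- ===== PORT A =====
-- state: (details, cleaned_chars, current_detail, depth)
def edpStepA : (List String × List Char × List Char × Int) → Char → (List String × List Char × List Char × Int)
  | (details, cleaned, cur, depth), c =>
    if c = '(' then
      if depth = 0 then (details, cleaned, [], depth + 1)
      else (details, cleaned, cur ++ [c], depth + 1)
    else if c = ')' then
      if depth = 0 then (details, cleaned ++ [c], cur, depth)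
      else if depth - 1 = 0 then
        let content := PySem.Chars.strip cur
        if content ≠ [] ∧ PySem.Chars.startswith content ['-'] = false then
          (details ++ [String.ofList content], cleaned, [], depth - 1)
        else (details, cleaned, [], depth - 1)
      else (details, cleaned, cur ++ [c], depth - 1)
    else if depth = 0 then (details, cleaned ++ [c], cur, depth)
    else (details, cleaned, cur ++ [c], depth)

def extract_details_from_parentheses (text : String) : String × List String :=
  match text.toList.foldl edpStepA ([], [], [], 0) with
  | (details, cleaned, cur, depth) =>
    let cleaned := if depth > 0 then cleaned ++ '(' :: cur else cleaned
    (String.ofList (PySem.Chars.strip cleaned), details)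

-- ===== PORT B =====
-- the Python list used as a stack (append/pop/[-1]) is represented with its TOP at the HEAD
-- state: (details, outer, stack)
def edpStepB : (List String × List Char × List (List Char)) → Char → (List String × List Char × List (List Char))
  | (details, outer, stack), c =>
    if c = '(' then (details, outer, [] :: stack)
    else if c = ')' then
      match stack with
      | [] => (details, outer ++ [c], [])
      | f :: rest =>
        match rest with
        | [] =>
          let content := PySem.Chars.strip f
          if content ≠ [] ∧ PySem.Chars.startswith content ['-'] = false then
            (details ++ [String.ofList content], outer, [])
          else (details, outer, [])
        | g :: rs => (details, outer, (g ++ '(' :: f ++ [')']) :: rs)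
    else
      match stack with
      | [] => (details, outer ++ [c], [])
      | f :: rest => (details, outer, (f ++ [c]) :: rest)

-- the final while loop: pop each unclosed frame, prepend "(" ++ frame to the tail
def edpFlatten : List (List Char) → List Char → List Char
  | [], tail => tail
  | f :: rest, tail => edpFlatten rest ('(' :: f ++ tail)

def extract_details_from_parentheses_alt (text : String) : String × List String :=
  match text.toList.foldl edpStepB ([], [], []) with
  | (details, outer, stack) =>
    (String.ofList (PySem.Chars.strip (outer ++ edpFlatten stack [])), details)

-- ===== PRECONDITION & SPEC =====
def Spec_extract_details_from_parentheses (text : String) (out : String × List String) : Prop := out = extract_details_from_parentheses_alt text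
instance (text : String) (out : String × List String) : Decidable (Spec_extract_details_from_parentheses text out) := by unfold Spec_extract_details_from_parentheses; infer_instance

-- ===== CLAIM (what is proved, stated in full; the proofs are below) =====
def Claim_equal_extract_details_from_parentheses : Prop := ∀ (text : String), Dom_extract_details_from_parentheses text → Spec_extract_details_from_parentheses text (extract_details_from_parentheses text)

-- ===== LEMMAS AND PROOFS =====

def edpFinishA : (List String × List Char × List Char × Int) → String × List String
  | (details, cleaned, cur, depth) =>
    (String.ofList (PySem.Chars.strip (if depth > 0 then cleaned ++ '(' :: cur else cleaned)), details)

def edpFinishB : (List String × List Char × List (List Char)) → String × List String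
  | (details, outer, stack) =>
    (String.ofList (PySem.Chars.strip (outer ++ edpFlatten stack [])), details)

lemma edpFlatten_append (s : List (List Char)) (t u : List Char) :
    edpFlatten s (t ++ u) = edpFlatten s t ++ u := by
  induction s generalizing t with
  | nil => rfl
  | cons f rest ih =>
      simp only [edpFlatten]
      rw [show '(' :: f ++ (t ++ u) = ('(' :: f ++ t) ++ u by simp, ih]

lemma edpFlatten_eq (s : List (List Char)) (t : List Char) :
    edpFlatten s t = edpFlatten s [] ++ t := by
  simpa using edpFlatten_append s [] t

lemma edp_loop (cs : List Char) :
    ∀ (details : List String) (cleaned cur : List Char) (stack : List (List Char)) (depth : Int),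
    depth = (stack.length : Int) →
    (stack ≠ [] → edpFlatten stack [] = '(' :: cur) →
    edpFinishA (cs.foldl edpStepA (details, cleaned, cur, depth)) =
    edpFinishB (cs.foldl edpStepB (details, cleaned, stack)) := by
  induction cs with
  | nil =>
      intro details cleaned cur stack depth hd hcur
      cases stack with
      | nil =>
          simp at hd
          simp [edpFinishA, edpFinishB, edpFlatten, hd]
      | cons f rest =>
          have h := hcur (by simp)
          have hpos : depth > 0 := by simp [hd]
          simp [edpFinishA, edpFinishB, h, hpos]
  | cons c cs ih =>
      intro details cleaned cur stack depth hd hcur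
      simp only [List.foldl_cons]
      by_cases h1 : c = '('
      · subst h1
        cases stack with
        | nil =>
            simp at hd
            rw [show edpStepA (details, cleaned, cur, depth) '(' = (details, cleaned, [], (1:Int)) by
                  simp [edpStepA, hd],
                show edpStepB (details, cleaned, []) '(' = (details, cleaned, [[]]) by
                  simp [edpStepB]]
            exact ih _ _ _ _ _ (by simp) (by intro _; rfl)
        | cons f rest =>
            have hd' := hd; simp at hd'
            have hne : depth ≠ 0 := by omega
            have h := hcur (by simp)
            rw [show edpStepA (details, cleaned, cur, depth) '(' = (details, cleaned, cur ++ ['('], depth + 1) by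
                  simp [edpStepA, hne],
                show edpStepB (details, cleaned, f :: rest) '(' = (details, cleaned, [] :: f :: rest) by
                  simp [edpStepB]]
            apply ih _ _ _ _ _ (by simp [hd])
            intro _
            show edpFlatten (f :: rest) ['('] = _
            rw [edpFlatten_eq, h]; simp
      · by_cases h2 : c = ')'
        · subst h2
          cases stack with
          | nil =>
              simp at hd
              rw [show edpStepA (details, cleaned, cur, depth) ')' = (details, cleaned ++ [')'], cur, depth) by
                    simp [edpStepA, hd],
                  show edpStepB (details, cleaned, []) ')' = (details, cleaned ++ [')'], []) by
                    simp [edpStepB]]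
              exact ih _ _ _ _ _ hd hcur
          | cons f rest =>
              have h := hcur (by simp)
              cases rest with
              | nil =>
                  have hd1 : depth = 1 := by simpa using hd
                  have hfc : cur = f := by
                    have h2 : edpFlatten [f] [] = '(' :: cur := h
                    simp [edpFlatten] at h2
                    first | exact h2 | exact h2.symm
                  rw [hfc]
                  rw [show edpStepA (details, cleaned, f, depth) ')' =
                        (if PySem.Chars.strip f ≠ [] ∧ PySem.Chars.startswith (PySem.Chars.strip f) ['-'] = false then
                           (details ++ [String.ofList (PySem.Chars.strip f)], cleaned, ([]:List Char), (0:Int))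
                         else (details, cleaned, ([]:List Char), (0:Int))) by
                        simp [edpStepA, hd1],
                      show edpStepB (details, cleaned, [f]) ')' =
                        (if PySem.Chars.strip f ≠ [] ∧ PySem.Chars.startswith (PySem.Chars.strip f) ['-'] = false then
                           (details ++ [String.ofList (PySem.Chars.strip f)], cleaned, ([]:List (List Char)))
                         else (details, cleaned, ([]:List (List Char)))) by
                        simp [edpStepB]]
                  split_ifs with hc
                  · exact ih _ _ _ _ _ (by simp) (by simp)
                  · exact ih _ _ _ _ _ (by simp) (by simp)
              | cons g rs =>
                  have hd' := hd; simp at hd'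
                  have hne : depth ≠ 0 ∧ depth - 1 ≠ 0 := ⟨by omega, by omega⟩
                  rw [show edpStepA (details, cleaned, cur, depth) ')' = (details, cleaned, cur ++ [')'], depth - 1) by
                        simp [edpStepA, hne.1, hne.2],
                      show edpStepB (details, cleaned, f :: g :: rs) ')' =
                        (details, cleaned, (g ++ '(' :: f ++ [')']) :: rs) by
                        simp [edpStepB]]
                  apply ih _ _ _ _ _ (by simp [hd])
                  intro _
                  have hold : edpFlatten rs ('(' :: g ++ ('(' :: f)) = '(' :: cur := by
                    simpa [edpFlatten] using h
                  simp only [edpFlatten, List.append_nil]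
                  rw [show '(' :: (g ++ '(' :: f ++ [')']) = ('(' :: g ++ ('(' :: f)) ++ [')'] by simp,
                      edpFlatten_append, hold]
                  simp
        · cases stack with
          | nil =>
              simp at hd
              rw [show edpStepA (details, cleaned, cur, depth) c = (details, cleaned ++ [c], cur, depth) by
                    simp [edpStepA, hd, h1, h2],
                  show edpStepB (details, cleaned, []) c = (details, cleaned ++ [c], []) by
                    simp [edpStepB, h1, h2]]
              exact ih _ _ _ _ _ hd hcur
          | cons f rest =>
              have hd' := hd; simp at hd'
              have hne : depth ≠ 0 := by omega
              have h := hcur (by simp)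
              rw [show edpStepA (details, cleaned, cur, depth) c = (details, cleaned, cur ++ [c], depth) by
                    simp [edpStepA, h1, h2, hne],
                  show edpStepB (details, cleaned, f :: rest) c = (details, cleaned, (f ++ [c]) :: rest) by
                    simp [edpStepB, h1, h2]]
              apply ih _ _ _ _ _ (by simp [hd])
              intro _
              simp only [edpFlatten, List.append_nil]
              rw [show '(' :: (f ++ [c]) = ('(' :: f) ++ [c] by simp, edpFlatten_append]
              have : edpFlatten rest ('(' :: f) = '(' :: cur := by simpa [edpFlatten] using h
              rw [this]; simp

lemma edpA_finish (text : String) :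
    extract_details_from_parentheses text = edpFinishA (text.toList.foldl edpStepA ([], [], [], 0)) := by
  unfold extract_details_from_parentheses
  rcases text.toList.foldl edpStepA ([], [], [], 0) with ⟨d, cl, cur, dp⟩
  rfl

lemma edpB_finish (text : String) :
    extract_details_from_parentheses_alt text = edpFinishB (text.toList.foldl edpStepB ([], [], [])) := by
  unfold extract_details_from_parentheses_alt
  rcases text.toList.foldl edpStepB ([], [], []) with ⟨d, o, s⟩
  rfl

-- ===== VERDICT (by name: the statement is the Claim_ definition above) =====
theorem extract_details_from_parentheses_spec : Claim_equal_extract_details_from_parentheses := by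
  intro text _
  show _ = _
  rw [edpA_finish, edpB_finish]
  exact edp_loop text.toList [] [] [] [] 0 (by simp) (by simp)
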